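-- pv_equiv track=rewrite | github.com/yassienshaalan/zerophix | tests/regression_suite.py | labels_match
-- ===== SOURCE A (Python) =====
-- from typing import List, Dict, Optional, Tuple, Set
--
-- LABEL_ALIASES: Dict[str, Set[str]] = {
--     "SSN": {"social_security_number", "tax_identification_number", "tax_file_number", "tfn", "id"},
--     "EMAIL": {"email_address"},
--     "PHONE_US": {"phone", "phone_number", "telephone", "phone_us"},
--     "CREDIT_CARD": {"card_number", "card", "credit_card_number"},
--     "PERSON_NAME": {"name", "person", "person_name"},
--     "MEDICAL_RECORD": {"mrn", "record_number", "patient_id", "medical_record_number"},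
--     "ORGANIZATION": {"org", "company"},
--     "LOCATION": {"loc", "gpe", "address", "place"},
--     "MEDICATION": {"drug", "medicine", "drug_name"},
--     "MEDICAL_CONDITION": {"disease", "diagnosis", "condition"},
--     "TFN": {"tax_file_number", "ssn"},
--     "ABN": {"australian_business_number"},
--     "ACN": {"australian_company_number"},
--     "MEDICARE": {"medicare_number"},
-- }
--
-- def labels_match(detected: Set[str], expected: List[str]) -> bool:
--     """Check if detected labels match expected, using alias resolution."""
--     if not expected:
--         # For no-PII cases: fail if any PII entity was detected
--         pii_labels = {
--             "ssn", "email", "phone", "phone_us", "credit_card", "name",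
--             "person", "person_name", "medical_record", "mrn",
--         }
--         detected_lower = {l.lower() for l in detected}
--         for d in detected_lower:
--             if d in pii_labels or any(p in d for p in pii_labels):
--                 return False
--         return True
--
--     detected_lower = {l.lower() for l in detected}
--
--     for exp in expected:
--         exp_lower = exp.lower()
--         if exp_lower in detected_lower:
--             continue
--
--         # Check aliases
--         found = False
--         for canonical, aliases in LABEL_ALIASES.items():
--             all_variants = {canonical.lower()} | {a.lower() for a in aliases}
--             if exp_lower in all_variants:
--                 if any(d in all_variants for d in detected_lower):
--                     found = True
--                     break
--
--         # Substring fallback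
--         if not found:
--             for d in detected_lower:
--                 if len(exp_lower) > 3 and len(d) > 3:
--                     if exp_lower in d or d in exp_lower:
--                         found = True
--                         break
--
--         if not found:
--             return False
--
--     return True
-- ===== SOURCE B (Python) =====
-- from typing import List, Dict, Set
--
-- LABEL_ALIASES: Dict[str, Set[str]] = {
--     "SSN": {"social_security_number", "tax_identification_number", "tax_file_number", "tfn", "id"},
--     "EMAIL": {"email_address"},
--     "PHONE_US": {"phone", "phone_number", "telephone", "phone_us"},
--     "CREDIT_CARD": {"card_number", "card", "credit_card_number"},
--     "PERSON_NAME": {"name", "person", "person_name"},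
--     "MEDICAL_RECORD": {"mrn", "record_number", "patient_id", "medical_record_number"},
--     "ORGANIZATION": {"org", "company"},
--     "LOCATION": {"loc", "gpe", "address", "place"},
--     "MEDICATION": {"drug", "medicine", "drug_name"},
--     "MEDICAL_CONDITION": {"disease", "diagnosis", "condition"},
--     "TFN": {"tax_file_number", "ssn"},
--     "ABN": {"australian_business_number"},
--     "ACN": {"australian_company_number"},
--     "MEDICARE": {"medicare_number"},
-- }
--
-- _PII_LABELS = frozenset({
--     "ssn", "email", "phone", "phone_us", "credit_card", "name",
--     "person", "person_name", "medical_record", "mrn",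
-- })
--
-- # Reverse index built once: token -> list of whole variant groups containing it.
-- _VARIANT_INDEX: Dict[str, List[frozenset]] = {}
-- for _canonical, _aliases in LABEL_ALIASES.items():
--     _group = frozenset({_canonical.lower()} | {a.lower() for a in _aliases})
--     for _tok in _group:
--         _VARIANT_INDEX.setdefault(_tok, []).append(_group)
--
--
-- def labels_match(detected: Set[str], expected: List[str]) -> bool:
--     """Check if detected labels match expected, using alias resolution."""
--     detected_lower = {l.lower() for l in detected}
--     if not expected:
--         return not any(
--             d in _PII_LABELS or any(p in d for p in _PII_LABELS)
--             for d in detected_lower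
--         )
--     return all(
--         exp_lower in detected_lower
--         or any(group & detected_lower for group in _VARIANT_INDEX.get(exp_lower, []))
--         or any(len(exp_lower) > 3 and len(d) > 3 and (exp_lower in d or d in exp_lower)
--                for d in detected_lower)
--         for exp_lower in map(str.lower, expected)
--     )
-- ===== Notes on version B (the rewrite author's own statement) =====
-- stated objective: alternative
-- what changed: B precomputes once a reverse index mapping each token to the variant groups containing it, so the per-expected-label scan over LABEL_ALIASES becomes a single dict lookup, and replaces A's flag-and-break loops by any/all over the detected set.
import Mathlib
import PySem

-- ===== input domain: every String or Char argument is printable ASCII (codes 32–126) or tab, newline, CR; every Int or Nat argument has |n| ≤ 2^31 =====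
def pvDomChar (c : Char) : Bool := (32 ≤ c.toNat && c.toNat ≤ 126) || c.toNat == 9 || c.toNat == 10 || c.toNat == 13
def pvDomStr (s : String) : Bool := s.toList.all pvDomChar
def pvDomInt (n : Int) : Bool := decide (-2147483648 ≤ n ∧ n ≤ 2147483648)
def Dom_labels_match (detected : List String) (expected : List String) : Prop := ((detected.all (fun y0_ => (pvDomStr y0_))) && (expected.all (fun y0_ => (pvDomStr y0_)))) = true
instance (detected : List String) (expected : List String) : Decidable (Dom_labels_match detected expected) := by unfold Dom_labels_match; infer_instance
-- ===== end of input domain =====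

-- B replaces A's inner scan over LABEL_ALIASES by a reverse index (token -> variant groups) built once,
-- and folds the flag-and-break loops into any/all; return value only (objective: simpler/alternative).

-- ===== PORT A =====
-- LABEL_ALIASES (shared data: both Pythons carry the same literal table)
def labelAliases : List (String × List String) := [
  ("SSN", ["social_security_number", "tax_identification_number", "tax_file_number", "tfn", "id"]),
  ("EMAIL", ["email_address"]),
  ("PHONE_US", ["phone", "phone_number", "telephone", "phone_us"]),
  ("CREDIT_CARD", ["card_number", "card", "credit_card_number"]),
  ("PERSON_NAME", ["name", "person", "person_name"]),
  ("MEDICAL_RECORD", ["mrn", "record_number", "patient_id", "medical_record_number"]),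
  ("ORGANIZATION", ["org", "company"]),
  ("LOCATION", ["loc", "gpe", "address", "place"]),
  ("MEDICATION", ["drug", "medicine", "drug_name"]),
  ("MEDICAL_CONDITION", ["disease", "diagnosis", "condition"]),
  ("TFN", ["tax_file_number", "ssn"]),
  ("ABN", ["australian_business_number"]),
  ("ACN", ["australian_company_number"]),
  ("MEDICARE", ["medicare_number"])]

-- all_variants = {canonical.lower()} | {a.lower() for a in aliases}   (identical expression in both Pythons)
def allVariants (canonical : String) (aliases : List String) : PySem.Set String :=
  PySem.Set.union (PySem.Set.ofList [PySem.Str.lower canonical]) (aliases.map PySem.Str.lower)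

-- the pii_labels set literal (A builds it inline; B's module constant _PII_LABELS is the same literal)
def piiLabels : PySem.Set String :=
  PySem.Set.ofList ["ssn", "email", "phone", "phone_us", "credit_card", "name",
                    "person", "person_name", "medical_record", "mrn"]

-- 'for d in detected_lower: if d in pii_labels or any(p in d …): return False / return True'
def aPiiLoop : List String → Bool
  | [] => true
  | d :: rest =>
      if piiLabels.contains d || piiLabels.any (fun p => PySem.Str.isIn p d) then false
      else aPiiLoop rest

-- 'for canonical, aliases in LABEL_ALIASES.items(): … found = True; break'
def aAliasLoop (el : String) (dl : List String) : List (String × List String) → Bool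
  | [] => false
  | (c, as_) :: rest =>
      let vs := allVariants c as_
      if vs.contains el then
        if dl.any (fun d => vs.contains d) then true else aAliasLoop el dl rest
      else aAliasLoop el dl rest

-- substring fallback loop with break
def aSubstrLoop (el : String) : List String → Bool
  | [] => false
  | d :: rest =>
      if PySem.Str.len el > 3 && PySem.Str.len d > 3 then
        if PySem.Str.isIn el d || PySem.Str.isIn d el then true else aSubstrLoop el rest
      else aSubstrLoop el rest

-- 'for exp in expected: … if not found: return False / return True'
def aExpLoop (dl : List String) : List String → Bool
  | [] => true
  | exp :: rest =>
      let el := PySem.Str.lower exp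
      if dl.contains el then aExpLoop dl rest
      else
        let found := aAliasLoop el dl labelAliases
        let found := if found then found else aSubstrLoop el dl
        if found then aExpLoop dl rest else false

def labels_match (detected : List String) (expected : List String) : Bool :=
  if expected.isEmpty then
    let dl : PySem.Set String := PySem.Set.ofList (detected.map PySem.Str.lower)
    aPiiLoop dl
  else
    let dl : PySem.Set String := PySem.Set.ofList (detected.map PySem.Str.lower)
    aExpLoop dl expected

-- ===== PORT B =====
-- _VARIANT_INDEX: token -> list of whole variant groups containing it, built once over the table
def variantIndex : PySem.Dict String (List (PySem.Set String)) :=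
  labelAliases.foldl
    (fun idx cg =>
      let group := allVariants cg.1 cg.2
      group.foldl (fun idx tok => idx.insert tok (idx.getD tok [] ++ [group])) idx)
    PySem.Dict.empty

def labels_match_alt (detected : List String) (expected : List String) : Bool :=
  let dl : PySem.Set String := PySem.Set.ofList (detected.map PySem.Str.lower)
  if expected.isEmpty then
    !(dl.any (fun d => piiLabels.contains d || piiLabels.any (fun p => PySem.Str.isIn p d)))
  else
    expected.all (fun exp =>
      let el := PySem.Str.lower exp
      dl.contains el
      || (variantIndex.getD el []).any (fun group => !(PySem.Set.inter group dl).isEmpty)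
      || dl.any (fun d => PySem.Str.len el > 3 && PySem.Str.len d > 3
                          && (PySem.Str.isIn el d || PySem.Str.isIn d el)))

-- ===== PRECONDITION & SPEC =====
def Spec_labels_match (detected : List String) (expected : List String) (out : Bool) : Prop := out = labels_match_alt detected expected
instance (detected : List String) (expected : List String) (out : Bool) : Decidable (Spec_labels_match detected expected out) := by unfold Spec_labels_match; infer_instance

-- ===== CLAIM (what is proved, stated in full; the proofs are below) =====
def Claim_equal_labels_match : Prop := ∀ (detected : List String) (expected : List String), Dom_labels_match detected expected → Spec_labels_match detected expected (labels_match detected expected)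

-- ===== LEMMAS AND PROOFS =====

theorem aPiiLoop_eq (l : List String) :
    aPiiLoop l = !(l.any (fun d => piiLabels.contains d || piiLabels.any (fun p => PySem.Str.isIn p d))) := by
  induction l with
  | nil => rfl
  | cons d rest ih =>
      simp only [aPiiLoop, List.any_cons, ih]
      cases h : (piiLabels.contains d || piiLabels.any (fun p => PySem.Str.isIn p d)) <;> simp

theorem aSubstrLoop_eq (el : String) (l : List String) :
    aSubstrLoop el l = l.any (fun d => PySem.Str.len el > 3 && PySem.Str.len d > 3
                          && (PySem.Str.isIn el d || PySem.Str.isIn d el)) := by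
  induction l with
  | nil => rfl
  | cons d rest ih =>
      simp only [aSubstrLoop, List.any_cons, ← ih]
      cases h1 : (decide (PySem.Str.len el > 3) && decide (PySem.Str.len d > 3)) <;>
        cases h2 : (PySem.Str.isIn el d || PySem.Str.isIn d el) <;>
          simp_all [Bool.and_assoc]

theorem aAliasLoop_eq (el : String) (dl : List String) (table : List (String × List String)) :
    aAliasLoop el dl table
      = table.any (fun cg => (allVariants cg.1 cg.2).contains el
                              && dl.any (fun d => (allVariants cg.1 cg.2).contains d)) := by
  induction table with
  | nil => rfl
  | cons cg rest ih =>
      obtain ⟨c, as_⟩ := cg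
      simp only [aAliasLoop, List.any_cons, ih]
      cases h1 : (allVariants c as_).contains el <;>
        cases h2 : dl.any (fun d => (allVariants c as_).contains d) <;>
          simp_all

-- inner fold of the index build: append the fixed group g under every token of toks
theorem getD_buildInner (g : PySem.Set String) (el : String) :
    ∀ (toks : List String), toks.Nodup →
      ∀ (idx : PySem.Dict String (List (PySem.Set String))),
      (toks.foldl (fun idx tok => idx.insert tok (idx.getD tok [] ++ [g])) idx).getD el []
        = idx.getD el [] ++ (if toks.contains el then [g] else []) := by
  intro toks
  induction toks with
  | nil => intro _ idx; simp
  | cons tok rest ih =>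
      intro hnd idx
      have hrest : rest.Nodup := hnd.of_cons
      simp only [List.foldl_cons]
      rw [ih hrest]
      by_cases h : el = tok
      · subst h
        have hel : el ∉ rest := (List.nodup_cons.mp hnd).1
        simp [hel]
      · simp [PySem.Dict.getD_insert, h]

theorem getD_buildOuter (el : String) :
    ∀ (table : List (String × List String)),
      (∀ cg ∈ table, (allVariants cg.1 cg.2).Nodup) →
      ∀ (idx : PySem.Dict String (List (PySem.Set String))),
      (table.foldl
        (fun idx cg =>
          let group := allVariants cg.1 cg.2
          group.foldl (fun idx tok => idx.insert tok (idx.getD tok [] ++ [group])) idx)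
        idx).getD el []
      = idx.getD el []
        ++ (table.filter (fun cg => (allVariants cg.1 cg.2).contains el)).map
              (fun cg => allVariants cg.1 cg.2) := by
  intro table
  induction table with
  | nil => intro _ idx; simp
  | cons cg rest ih =>
      intro hnd idx
      simp only [List.foldl_cons]
      rw [ih (fun x hx => hnd x (List.mem_cons_of_mem _ hx))]
      rw [getD_buildInner _ el _ (hnd cg (List.mem_cons_self)) idx]
      by_cases h : el ∈ allVariants cg.1 cg.2 <;>
        simp [h]

theorem nodup_table_variants : ∀ cg ∈ labelAliases, (allVariants cg.1 cg.2).Nodup := by decide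

theorem getD_variantIndex (el : String) :
    variantIndex.getD el []
      = (labelAliases.filter (fun cg => (allVariants cg.1 cg.2).contains el)).map
          (fun cg => allVariants cg.1 cg.2) := by
  unfold variantIndex
  rw [getD_buildOuter el labelAliases nodup_table_variants]
  simp

theorem inter_nonempty_eq (g dl : List String) :
    (!(PySem.Set.inter g dl).isEmpty) = dl.any (fun d => g.contains d) := by
  simp only [PySem.Set.inter, PySem.Set.contains]
  rw [Bool.eq_iff_iff]
  simp only [Bool.not_eq_eq_eq_not, Bool.not_true, List.isEmpty_eq_false_iff, List.any_eq_true,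
    List.contains_eq_mem, decide_eq_true_eq]
  simp only [ne_eq, List.filter_eq_nil_iff, decide_eq_true_eq]
  rw [not_forall]
  constructor
  · rintro ⟨x, hx⟩
    rw [Classical.not_imp] at hx
    obtain ⟨hxg, hxdl⟩ := hx
    rw [not_not] at hxdl
    exact ⟨x, hxdl, hxg⟩
  · rintro ⟨x, hxdl, hxg⟩
    exact ⟨x, by simp [hxg, hxdl]⟩

-- per-exp: A's found computation equals B's per-element predicate (given el ∉ dl not needed)
theorem found_eq (el : String) (dl : List String) :
    ((variantIndex.getD el []).any (fun group => !(PySem.Set.inter group dl).isEmpty))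
      = aAliasLoop el dl labelAliases := by
  rw [aAliasLoop_eq, getD_variantIndex, List.any_map, List.any_filter]
  refine List.any_congr rfl (fun cg => ?_)
  simp [Function.comp, inter_nonempty_eq, PySem.Set.contains]

theorem aExpLoop_flag (dl : List String) (l : List String) :
    aExpLoop dl l = l.all (fun exp =>
      dl.contains (PySem.Str.lower exp)
      || aAliasLoop (PySem.Str.lower exp) dl labelAliases
      || aSubstrLoop (PySem.Str.lower exp) dl) := by
  induction l with
  | nil => rfl
  | cons exp rest ih =>
      simp only [aExpLoop, List.all_cons, ih]
      cases h1 : dl.contains (PySem.Str.lower exp) <;>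
        cases h2 : aAliasLoop (PySem.Str.lower exp) dl labelAliases <;>
          cases h3 : aSubstrLoop (PySem.Str.lower exp) dl <;> simp_all

theorem aExpLoop_eq (dl : List String) (expected : List String) :
    aExpLoop dl expected
      = expected.all (fun exp =>
          let el := PySem.Str.lower exp
          dl.contains el
          || (variantIndex.getD el []).any (fun group => !(PySem.Set.inter group dl).isEmpty)
          || dl.any (fun d => PySem.Str.len el > 3 && PySem.Str.len d > 3
                          && (PySem.Str.isIn el d || PySem.Str.isIn d el))) := by
  rw [aExpLoop_flag]
  refine List.all_congr rfl (fun exp => ?_)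
  simp only [found_eq, ← aSubstrLoop_eq]

-- ===== VERDICT (by name: the statement is the Claim_ definition above) =====
theorem labels_match_spec : Claim_equal_labels_match := by
  intro detected expected _
  unfold Spec_labels_match labels_match labels_match_alt
  by_cases he : expected.isEmpty <;>
    simp [he, aPiiLoop_eq, aExpLoop_eq]
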